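-- pv_equiv track=rewrite | github.com/knighton/zen | zen/api/merge/concat.py | concat_out_shape
-- ===== SOURCE A (Python) =====
-- def concat_out_shape(in_shapes, axis):
--     """
--     in_shapes   (in_channels, shape...)
--     axis        int
--     """
--     assert isinstance(axis, int)
--     assert 1 <= axis
--     axis -= 1
--     shapes = set()
--     concat_dim = 0
--     for shape in in_shapes:
--         shape = list(shape)
--         concat_dim += shape[axis]
--         shape[axis] = None
--         shape = tuple(shape)
--         shapes.add(shape)
--     assert len(shapes) == 1
--     out_shape = list(list(shapes)[0])
--     out_shape[axis] = concat_dim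
--     return tuple(out_shape)
-- ===== SOURCE B (Python) =====
-- def concat_out_shape(in_shapes, axis):
--     """
--     in_shapes   (in_channels, shape...)
--     axis        int
--     """
--     assert isinstance(axis, int)
--     assert 1 <= axis
--     axis -= 1
--     shapes = list(in_shapes)
--     assert shapes
--     ref = list(shapes[0])
--     concat_dim = ref[axis]
--     for shape in shapes[1:]:
--         shape = list(shape)
--         assert len(shape) == len(ref)
--         for i in range(len(ref)):
--             if i != axis:
--                 assert shape[i] == ref[i]
--         concat_dim += shape[axis]
--     ref[axis] = concat_dim
--     return tuple(ref)
-- ===== Notes on version B (the rewrite author's own statement) =====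
-- stated objective: simpler
-- what changed: Replaces the set of None-masked tuples (build set, assert singleton, rebuild) with a single reference template: B keeps the first shape, checks each later shape pairwise against it off the axis, and accumulates the axis dimension directly.
import Mathlib
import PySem

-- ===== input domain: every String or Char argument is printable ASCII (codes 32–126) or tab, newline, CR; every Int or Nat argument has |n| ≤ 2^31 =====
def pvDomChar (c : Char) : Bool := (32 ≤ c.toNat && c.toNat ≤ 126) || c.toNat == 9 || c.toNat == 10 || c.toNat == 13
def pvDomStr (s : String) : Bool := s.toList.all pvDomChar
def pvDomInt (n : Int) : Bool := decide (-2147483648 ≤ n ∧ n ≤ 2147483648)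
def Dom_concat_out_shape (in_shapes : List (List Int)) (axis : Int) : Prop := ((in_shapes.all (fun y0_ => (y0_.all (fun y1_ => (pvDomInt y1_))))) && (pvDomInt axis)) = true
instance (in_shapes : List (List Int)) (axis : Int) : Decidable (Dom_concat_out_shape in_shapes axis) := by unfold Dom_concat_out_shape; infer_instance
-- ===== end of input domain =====

-- B replaces A's set of None-masked shapes by a first-shape reference template with
-- pairwise off-axis checks (objective: simpler). Equivalence is about the return value;
-- on inputs where A raises (AssertionError/IndexError) Pre_ excludes the input.

-- ===== PORT A =====
-- A's loop: build a set of shapes with the axis entry masked to None, summing the axis entries;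
-- 'none' in the accumulator marks that an exception (IndexError) has occurred.
def concat_out_shape (in_shapes : List (List Int)) (axis : Int) : List Int :=
  if 1 ≤ axis then
    let a := axis - 1
    let r := in_shapes.foldl
      (fun (st : Option (PySem.Set (List (Option Int)) × Int)) shape =>
        match st with
        | none => none
        | some (shapes, cd) =>
          match PySem.List.pyGet? shape a with
          | none => none
          | some v =>
            some (PySem.Set.add shapes (PySem.List.pySetD (shape.map some) a none), cd + v))
      (some (PySem.Set.empty, 0))
    match r with
    | some ([s], cd) => (PySem.List.pySetD s a (some cd)).map (fun o => o.getD 0)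
    | _ => []  -- assert len(shapes) == 1 failed, or an IndexError: outside Pre_
  else []  -- assert 1 <= axis failed: outside Pre_

-- ===== PORT B =====
-- B's loop: first shape is the reference; each later shape is checked against it off the axis
-- while its axis entry is added to the running concat dimension.
def concat_out_shape_alt (in_shapes : List (List Int)) (axis : Int) : List Int :=
  if 1 ≤ axis then
    let a := axis - 1
    match in_shapes with
    | [] => []  -- assert shapes failed: outside Pre_
    | ref :: rest =>
      match PySem.List.pyGet? ref a with
      | none => []  -- IndexError: outside Pre_
      | some r0 =>
        let r := rest.foldl
          (fun (st : Option Int) shape =>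
            match st with
            | none => none
            | some cd =>
              if shape.length = ref.length ∧
                 ∀ i < ref.length, (i : Int) ≠ a → shape.getD i 0 = ref.getD i 0 then
                match PySem.List.pyGet? shape a with
                | none => none
                | some v => some (cd + v)
              else none)
          (some r0)
        match r with
        | none => []  -- AssertionError/IndexError in the loop: outside Pre_
        | some cd => PySem.List.pySetD ref a cd
  else []

-- ===== PRECONDITION & SPEC =====
-- Pre_ = exactly the inputs where A returns: axis ≥ 1, at least one shape, the (axis-1)
-- index in range for the first shape, and all shapes equal except possibly at that index.
def Pre_concat_out_shape (in_shapes : List (List Int)) (axis : Int) : Prop :=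
  1 ≤ axis ∧ in_shapes ≠ [] ∧ (axis - 1).toNat < in_shapes.headI.length ∧
  ∀ s ∈ in_shapes, s.length = in_shapes.headI.length ∧
    ∀ i < s.length, i ≠ (axis - 1).toNat → s.getD i 0 = in_shapes.headI.getD i 0
instance (in_shapes : List (List Int)) (axis : Int) : Decidable (Pre_concat_out_shape in_shapes axis) := by
  unfold Pre_concat_out_shape; infer_instance

def pvWitness_concat_out_shape : List (List Int) × Int := ([[3, 4, 5], [2, 4, 5]], 1)

def Spec_concat_out_shape (in_shapes : List (List Int)) (axis : Int) (out : List Int) : Prop := out = concat_out_shape_alt in_shapes axis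
instance (in_shapes : List (List Int)) (axis : Int) (out : List Int) : Decidable (Spec_concat_out_shape in_shapes axis out) := by unfold Spec_concat_out_shape; infer_instance

-- ===== CLAIM (what is proved, stated in full; the proofs are below) =====
def Claim_equal_concat_out_shape : Prop := ∀ (in_shapes : List (List Int)) (axis : Int), Dom_concat_out_shape in_shapes axis → Pre_concat_out_shape in_shapes axis → Spec_concat_out_shape in_shapes axis (concat_out_shape in_shapes axis)

-- ===== LEMMAS AND PROOFS =====

theorem pv_mask_eq (hd s : List Int) (na : Nat)
    (hlen : s.length = hd.length)
    (hoff : ∀ i < s.length, i ≠ na → s.getD i 0 = hd.getD i 0) :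
    (s.map some).set na (none : Option Int) = (hd.map some).set na none := by
  apply List.ext_getElem
  · simp [hlen]
  · intro i h1 h2
    simp only [List.getElem_set, List.getElem_map]
    split_ifs with hi
    · rfl
    · have hi' : i < s.length := by simpa using h1
      have hi'' : i < hd.length := by simpa using h2
      have := hoff i hi' (fun h => hi h.symm)
      rw [List.getD_eq_getElem s 0 hi', List.getD_eq_getElem hd 0 hi''] at this
      simp [this]

theorem pv_A_loop (hd : List Int) (na : Nat) (hna : na < hd.length) :
    ∀ (t : List (List Int)) (c : Int),
      (∀ s ∈ t, s.length = hd.length ∧ ∀ i < s.length, i ≠ na → s.getD i 0 = hd.getD i 0) →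
      t.foldl
        (fun (st : Option (PySem.Set (List (Option Int)) × Int)) shape =>
          match st with
          | none => none
          | some (shapes, cd) =>
            match PySem.List.pyGet? shape (na : Int) with
            | none => none
            | some v =>
              some (PySem.Set.add shapes (PySem.List.pySetD (shape.map some) (na : Int) none), cd + v))
        (some ([(hd.map some).set na none], c))
        = some ([(hd.map some).set na none], c + (t.map (fun s => s.getD na 0)).sum)
  | [], c, _ => by simp
  | s :: t, c, hall => by
    have hs := hall s (List.mem_cons_self)
    have hlen : na < s.length := by omega
    have hget : PySem.List.pyGet? s (na : Int) = some (s.getD na 0) := by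
      simp [PySem.List.pyGet?_natCast, List.getElem?_eq_getElem hlen]
    have hmask : (s.map some).set na (none : Option Int) = (hd.map some).set na none :=
      pv_mask_eq hd s na hs.1 hs.2
    simp only [List.foldl_cons, hget]
    rw [show (PySem.List.pySetD (s.map some) (na : Int) none) = (s.map some).set na none by simp,
        hmask]
    rw [show PySem.Set.add [(hd.map some).set na none] ((hd.map some).set na none)
          = [(hd.map some).set na none] by simp [PySem.Set.add]]
    rw [pv_A_loop hd na hna t (c + s.getD na 0) (fun x hx => hall x (List.mem_cons_of_mem _ hx))]
    simp; ring

theorem pv_B_loop (hd : List Int) (na : Nat) (hna : na < hd.length) :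
    ∀ (t : List (List Int)) (c : Int),
      (∀ s ∈ t, s.length = hd.length ∧ ∀ i < s.length, i ≠ na → s.getD i 0 = hd.getD i 0) →
      t.foldl
        (fun (st : Option Int) shape =>
          match st with
          | none => none
          | some cd =>
            if shape.length = hd.length ∧
               ∀ i < hd.length, (i : Int) ≠ (na : Int) → shape.getD i 0 = hd.getD i 0 then
              match PySem.List.pyGet? shape (na : Int) with
              | none => none
              | some v => some (cd + v)
            else none)
        (some c)
        = some (c + (t.map (fun s => s.getD na 0)).sum)
  | [], c, _ => by simp
  | s :: t, c, hall => by
    have hs := hall s (List.mem_cons_self)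
    have hlen : na < s.length := by omega
    have hget : PySem.List.pyGet? s (na : Int) = some (s.getD na 0) := by
      simp [PySem.List.pyGet?_natCast, List.getElem?_eq_getElem hlen]
    have hcond : s.length = hd.length ∧
        ∀ i < hd.length, (i : Int) ≠ (na : Int) → s.getD i 0 = hd.getD i 0 := by
      refine ⟨hs.1, fun i hi hne => hs.2 i (by omega) (by exact_mod_cast fun h => hne (by simp [h]))⟩
    simp only [List.foldl_cons, if_pos hcond, hget]
    rw [pv_B_loop hd na hna t (c + s.getD na 0) (fun x hx => hall x (List.mem_cons_of_mem _ hx))]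
    simp; ring

theorem concat_out_shape_spec : Claim_equal_concat_out_shape := by
  unfold Claim_equal_concat_out_shape Spec_concat_out_shape Pre_concat_out_shape
  intro in_shapes axis _dom
  rintro ⟨hax, hne, hna, hall⟩
  obtain ⟨hd, t, rfl⟩ : ∃ h t, in_shapes = h :: t := by
    cases in_shapes with
    | nil => exact absurd rfl hne
    | cons h t => exact ⟨h, t, rfl⟩
  simp only [List.headI] at hna hall
  set na := (axis - 1).toNat with hnadef
  have haxna : axis - 1 = (na : Int) := by omega
  have hhd := hall hd (List.mem_cons_self)
  have hget : PySem.List.pyGet? hd (na : Int) = some (hd.getD na 0) := by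
    simp [PySem.List.pyGet?_natCast, List.getElem?_eq_getElem hna]
  have htail : ∀ s ∈ t, s.length = hd.length ∧
      ∀ i < s.length, i ≠ na → s.getD i 0 = hd.getD i 0 :=
    fun s hs => hall s (List.mem_cons_of_mem _ hs)
  -- A side
  unfold concat_out_shape concat_out_shape_alt
  rw [if_pos hax, if_pos hax]
  simp only [haxna]
  simp only [List.foldl_cons, hget]
  rw [show (PySem.List.pySetD (hd.map some) (na : Int) none) = (hd.map some).set na none by simp]
  rw [show PySem.Set.add PySem.Set.empty ((hd.map some).set na none)
        = [(hd.map some).set na none] by simp [PySem.Set.add, PySem.Set.empty, PySem.Set.contains]]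
  rw [pv_A_loop hd na hna t (0 + hd.getD na 0) htail]
  rw [pv_B_loop hd na hna t (hd.getD na 0) htail]
  simp only []
  rw [show PySem.List.pySetD ((hd.map some).set na none) (na : Int)
        (some (0 + hd.getD na 0 + (t.map (fun s => s.getD na 0)).sum))
        = ((hd.map some).set na none).set na (some (0 + hd.getD na 0 + (t.map (fun s => s.getD na 0)).sum)) by simp]
  rw [List.set_set]
  rw [show PySem.List.pySetD hd (na : Int) (hd.getD na 0 + (t.map (fun s => s.getD na 0)).sum)
        = hd.set na (hd.getD na 0 + (t.map (fun s => s.getD na 0)).sum) by simp]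
  rw [← List.map_set]
  simp [List.map_map]
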